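-- pv_equiv track=rewrite | github.com/syamamo1/blackjack | simulation.py | count_wins_losses
-- ===== SOURCE A (Python) =====
-- def count_wins_losses(blackjacks, wins, losses, results):
--     for result in results:
--         outcome = result[0]
--         if outcome == 'BLACKJACK':
--             blackjacks += 1
--         if outcome == 'WIN':
--             wins += 1
--         if outcome == 'LOSE':
--             losses += 1
--     return blackjacks, wins, losses
-- ===== SOURCE B (Python) =====
-- def count_wins_losses(blackjacks, wins, losses, results):
--     outcomes = [result[0] for result in results]
--     return (blackjacks + outcomes.count('BLACKJACK'),
--             wins + outcomes.count('WIN'),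
--             losses + outcomes.count('LOSE'))
-- ===== Notes on version B (the rewrite author's own statement) =====
-- stated objective: simpler
-- what changed: Replaces the single accumulator loop with three per-element branches by extracting the outcome column once and making three staged list.count passes, one per outcome; each returned component is computed independently instead of threading a triple through a loop.
import Mathlib
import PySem

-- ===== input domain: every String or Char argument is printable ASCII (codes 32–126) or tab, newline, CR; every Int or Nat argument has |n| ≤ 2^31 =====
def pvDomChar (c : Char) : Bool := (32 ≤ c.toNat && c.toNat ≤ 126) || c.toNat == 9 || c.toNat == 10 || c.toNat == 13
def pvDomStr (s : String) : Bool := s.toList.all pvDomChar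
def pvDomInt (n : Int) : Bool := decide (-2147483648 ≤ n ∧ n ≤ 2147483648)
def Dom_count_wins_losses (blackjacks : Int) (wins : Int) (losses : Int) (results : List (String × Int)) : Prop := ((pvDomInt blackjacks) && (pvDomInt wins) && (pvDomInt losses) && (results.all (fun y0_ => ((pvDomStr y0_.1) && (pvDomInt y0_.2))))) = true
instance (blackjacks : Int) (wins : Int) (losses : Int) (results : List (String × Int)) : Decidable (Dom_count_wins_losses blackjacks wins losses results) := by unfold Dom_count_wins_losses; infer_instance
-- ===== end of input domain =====

-- ===== PORT A =====
-- B extracts the outcome column once and computes each component with an independent count pass, instead of A's single loop threading a triple accumulator (objective: simpler).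
def count_wins_losses (blackjacks : Int) (wins : Int) (losses : Int) (results : List (String × Int)) : Int × Int × Int :=
  let s := results.foldl (fun (acc : Int × Int × Int) result =>
    let outcome := result.1
    let acc := if outcome == "BLACKJACK" then (acc.1 + 1, acc.2.1, acc.2.2) else acc
    let acc := if outcome == "WIN" then (acc.1, acc.2.1 + 1, acc.2.2) else acc
    if outcome == "LOSE" then (acc.1, acc.2.1, acc.2.2 + 1) else acc)
    (blackjacks, wins, losses)
  s

-- ===== PORT B =====
def count_wins_losses_alt (blackjacks : Int) (wins : Int) (losses : Int) (results : List (String × Int)) : Int × Int × Int :=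
  let outcomes := results.map (·.1)
  (blackjacks + (PySem.List.count outcomes "BLACKJACK" : Int),
   wins + (PySem.List.count outcomes "WIN" : Int),
   losses + (PySem.List.count outcomes "LOSE" : Int))

-- ===== PRECONDITION & SPEC =====
def Spec_count_wins_losses (blackjacks : Int) (wins : Int) (losses : Int) (results : List (String × Int)) (out : Int × Int × Int) : Prop := out = count_wins_losses_alt blackjacks wins losses results
instance (blackjacks : Int) (wins : Int) (losses : Int) (results : List (String × Int)) (out : Int × Int × Int) : Decidable (Spec_count_wins_losses blackjacks wins losses results out) := by unfold Spec_count_wins_losses; infer_instance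

-- ===== CLAIM =====
def Claim_equal_count_wins_losses : Prop := ∀ (blackjacks : Int) (wins : Int) (losses : Int) (results : List (String × Int)), Dom_count_wins_losses blackjacks wins losses results → Spec_count_wins_losses blackjacks wins losses results (count_wins_losses blackjacks wins losses results)

-- ===== LEMMAS AND PROOFS =====
theorem cwl_loop (results : List (String × Int)) : ∀ (b w l : Int),
    count_wins_losses b w l results = count_wins_losses_alt b w l results := by
  induction results with
  | nil => intro b w l; simp [count_wins_losses, count_wins_losses_alt, PySem.List.count]
  | cons r rs ih =>
    intro b w l
    simp only [count_wins_losses, List.foldl_cons] at *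
    rcases r with ⟨o, v⟩
    by_cases h1 : o = "BLACKJACK" <;> by_cases h2 : o = "WIN" <;> by_cases h3 : o = "LOSE" <;>
      simp_all [count_wins_losses_alt, PySem.List.count, List.count_cons] <;> ring

-- ===== VERDICT =====
theorem count_wins_losses_spec : Claim_equal_count_wins_losses := by
  intro b w l results _
  unfold Spec_count_wins_losses
  exact cwl_loop results b w l
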